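-- pv_equiv track=rewrite | github.com/shunya-tanaka-512/AtCoder | ABC088B/ABC088B.py | get_score_diff
-- ===== SOURCE A (Python) =====
-- def get_score_diff(scores: list) -> int:
--     # 奇数回は足す、偶数回は引く
--     score_diff = 0
--     new_scores = sorted(scores, reverse=True)  # sortedはlistを返す
--     for i, score in enumerate(new_scores):  # enumerateで要素とインデックス番号取得
--         if i % 2 == 0:
--             score_diff += score
--         else:
--             score_diff -= score
--     return score_diff
-- ===== SOURCE B (Python) =====
-- def get_score_diff(scores: list) -> int:
--     # sort once, then split by index parity with strided slices:
--     # the even-position half is added, the odd-position half subtracted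
--     s = sorted(scores, reverse=True)
--     return sum(s[0::2]) - sum(s[1::2])
-- ===== Notes on version B (the rewrite author's own statement) =====
-- stated objective: simpler
-- what changed: Replaces the single indexed loop with a per-element parity branch by sorting once, partitioning the sorted list into its even- and odd-position halves with strided slices, and returning the difference of the two halves' sums.
import Mathlib
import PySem

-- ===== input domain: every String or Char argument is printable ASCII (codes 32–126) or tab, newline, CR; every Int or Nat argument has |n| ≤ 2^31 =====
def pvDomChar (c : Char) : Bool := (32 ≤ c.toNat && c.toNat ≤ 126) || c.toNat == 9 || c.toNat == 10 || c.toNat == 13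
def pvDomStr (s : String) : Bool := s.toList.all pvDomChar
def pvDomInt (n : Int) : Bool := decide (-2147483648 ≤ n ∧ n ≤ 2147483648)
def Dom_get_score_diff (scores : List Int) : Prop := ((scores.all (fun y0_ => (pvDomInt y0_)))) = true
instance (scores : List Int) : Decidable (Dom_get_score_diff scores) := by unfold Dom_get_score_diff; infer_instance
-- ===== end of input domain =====

-- B sorts once, partitions the sorted list into even- and odd-position halves with strided slices, and returns the difference of the halves' sums; simpler decomposition, same cost.

-- ===== PORT A =====
def get_score_diff (scores : List Int) : Int :=
  let new_scores := PySem.List.sorted scores (fun x => x) true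
  (PySem.List.enumerate new_scores 0).foldl
    (fun score_diff p => if PySem.Int.mod p.1 2 == 0 then score_diff + p.2 else score_diff - p.2) 0

-- ===== PORT B =====
-- sum(s[0::2]) - sum(s[1::2]); slice? returns an Option (none only for step 0), so getD [] is the plain value
def get_score_diff_alt (scores : List Int) : Int :=
  let s := PySem.List.sorted scores (fun x => x) true
  ((PySem.List.slice? s (some 0) none 2).getD []).sum
    - ((PySem.List.slice? s (some 1) none 2).getD []).sum

-- ===== PRECONDITION & SPEC =====
def Spec_get_score_diff (scores : List Int) (out : Int) : Prop := out = get_score_diff_alt scores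
instance (scores : List Int) (out : Int) : Decidable (Spec_get_score_diff scores out) := by unfold Spec_get_score_diff; infer_instance

-- ===== CLAIM (what is proved, stated in full; the proofs are below) =====
def Claim_equal_get_score_diff : Prop := ∀ (scores : List Int), Dom_get_score_diff scores → Spec_get_score_diff scores (get_score_diff scores)

-- ===== LEMMAS AND PROOFS =====

-- proof-only helpers: alternating sum and the even-position half of a list
def pvAlt : List Int → Int
  | [] => 0
  | a :: t => a - pvAlt t

def pvEvens : List Int → List Int
  | [] => []
  | [a] => [a]
  | a :: _ :: t => a :: pvEvens t

theorem foldl_enumerate_alt (l : List Int) :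
    ∀ (s : Int) (acc : Int), 0 ≤ s →
    (PySem.List.enumerate l s).foldl
      (fun score_diff p => if PySem.Int.mod p.1 2 == 0 then score_diff + p.2 else score_diff - p.2) acc
    = acc + (if PySem.Int.mod s 2 == 0 then pvAlt l else -pvAlt l) := by
  induction l with
  | nil => intro s acc _; simp [PySem.List.enumerate_nil, pvAlt]
  | cons a t ih =>
    intro s acc hs
    rw [PySem.List.enumerate_cons, List.foldl_cons, ih (s + 1) _ (by omega)]
    have hmod : PySem.Int.mod s 2 = s % 2 := by
      simp [PySem.Int.mod, Int.fmod_eq_emod]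
    have hmod1 : PySem.Int.mod (s + 1) 2 = (s + 1) % 2 := by
      simp [PySem.Int.mod, Int.fmod_eq_emod]
    rw [hmod, hmod1]
    rcases Int.emod_two_eq_zero_or_one s with h | h
    · have h1 : (s + 1) % 2 = 1 := by omega
      simp [h, h1, pvAlt]; ring
    · have h1 : (s + 1) % 2 = 0 := by omega
      simp [h, h1, pvAlt]; ring

theorem filterMap_range_evens : ∀ (n : Nat) (l : List Int), l.length ≤ 2 * n →
    (List.range n).filterMap (fun k => l[2 * k]?) = pvEvens l := by
  intro n
  induction n with
  | zero =>
    intro l hl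
    have : l = [] := List.eq_nil_of_length_eq_zero (by omega)
    simp [this, pvEvens]
  | succ m ih =>
    intro l hl
    rw [List.range_succ_eq_map, List.filterMap_cons, List.filterMap_map]
    have hfun : (fun k => l[2 * Nat.succ k]?) ∘ id = fun k => (l.drop 2)[2 * k]? := by
      funext k
      simp [List.getElem?_drop]
      congr 1
      omega
    match l with
    | [] => simp [pvEvens]
    | [a] =>
      have : ∀ k : Nat, ([a] : List Int)[2 * Nat.succ k]? = none := by
        intro k; rw [List.getElem?_eq_none]; simp; omega
      simp [pvEvens]
    | a :: b :: t =>
      have hstep : ∀ k : Nat, (a :: b :: t)[2 * Nat.succ k]? = t[2 * k]? := by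
        intro k
        have h2 : 2 * Nat.succ k = 2 * k + 1 + 1 := by omega
        rw [h2]
        simp
      simp only [Function.comp_def, hstep]
      have ht : t.length ≤ 2 * m := by simp at hl; omega
      simp [pvEvens, ih t ht]

-- the slice s[0::2] is exactly the even-position half
theorem slice_evens (l : List Int) :
    PySem.List.slice? l (some 0) none 2 = some (pvEvens l) := by
  unfold PySem.List.slice? PySem.List.sliceIndices
  simp only [show ¬((2:Int) = 0) by decide, if_false, show ¬((2:Int) < 0) by decide,
    show ¬((0:Int) < 0) by decide]
  simp only [show (min (0:Int) (l.length:Int)) = 0 by omega]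
  rw [if_pos (by decide : (0:Int) < 2)]
  congr 1
  by_cases h : (0:Int) < (l.length:Int)
  · rw [if_pos h]
    have hcnt : (((l.length:Int) - 0 + 2 - 1) / 2).toNat = (l.length + 1) / 2 := by omega
    rw [hcnt]
    have hidx : ∀ k : Nat, l[((0:Int) + 2 * (k:Int)).toNat]? = l[2 * k]? := by
      intro k; congr 1; omega
    simp only [hidx]
    exact filterMap_range_evens _ l (by omega)
  · have h0 : l = [] := by
      have : l.length = 0 := by omega
      exact List.eq_nil_of_length_eq_zero this
    simp [h0, pvEvens]

-- the slice s[1::2] is the even-position half of the tail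
theorem slice_odds (l : List Int) :
    PySem.List.slice? l (some 1) none 2 = some (pvEvens (l.drop 1)) := by
  unfold PySem.List.slice? PySem.List.sliceIndices
  simp only [show ¬((2:Int) = 0) by decide, if_false, show ¬((2:Int) < 0) by decide,
    show ¬((1:Int) < 0) by decide]
  rw [if_pos (by decide : (0:Int) < 2)]
  congr 1
  match l with
  | [] => simp [pvEvens]
  | a :: t =>
    simp only [List.length_cons]
    rw [show (min (1:Int) ((t.length + 1 : Nat):Int)) = 1 from by omega]
    by_cases h : (1:Int) < ((t.length + 1 : Nat):Int)
    · rw [if_pos h,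
        show (((((t.length + 1 : Nat)):Int) - 1 + 2 - 1) / 2).toNat = (t.length + 1) / 2 from by omega]
      have hidx : ∀ k : Nat, (a :: t)[((1:Int) + 2 * (k:Int)).toNat]? = t[2 * k]? := by
        intro k
        have h1 : ((1:Int) + 2 * (k:Int)).toNat = 2 * k + 1 := by omega
        rw [h1]
        simp
      simp only [hidx]
      rw [filterMap_range_evens _ t (by omega)]
      simp
    · rw [if_neg h]
      have ht : t = [] := List.eq_nil_of_length_eq_zero (by omega)
      simp [ht, pvEvens]

theorem pvEvens_cons_tail (b : Int) (t : List Int) :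
    pvEvens (b :: t) = b :: pvEvens t.tail := by
  match t with
  | [] => simp [pvEvens]
  | c :: t' => simp [pvEvens]

theorem alt_eq_evens_sub (l : List Int) :
    pvAlt l = (pvEvens l).sum - (pvEvens (l.drop 1)).sum := by
  induction l using pvEvens.induct with
  | case1 => simp [pvAlt, pvEvens]
  | case2 a => simp [pvAlt, pvEvens]
  | case3 a b t ih =>
    simp [pvAlt, pvEvens, pvEvens_cons_tail, ih]
    ring

-- ===== VERDICT (by name: the statement is the Claim_ definition above) =====
theorem get_score_diff_spec : Claim_equal_get_score_diff := by
  intro scores _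
  unfold Spec_get_score_diff get_score_diff get_score_diff_alt
  rw [foldl_enumerate_alt _ 0 0 le_rfl]
  simp only [slice_evens, slice_odds, Option.getD_some]
  rw [alt_eq_evens_sub]
  simp [PySem.Int.mod]
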